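-- pv_equiv track=rewrite | github.com/dkl-2019/MachineLearning | contest/NLP_Demo/回文.py | min_pelindrome
-- ===== SOURCE A (Python) =====
-- def min_pelindrome(s: str) -> str:
--     s = list(s)
--     n = len(s)
--     changed = 0
--     for i in range(n // 2):
--         if s[i] != s[n - i - 1]:
--             if changed < 2:
--                 if s[i] < s[n -i -1]:
--                     s[n - i - 1] = s[i]
--                 else:
--                     s[i] = s[n -i - 1]
--                 changed += 1
--             else:
--                 return "无法在题目限制下行成回文字符串"
--     return "".join(s)
-- ===== SOURCE B (Python) =====
-- def min_pelindrome(s: str) -> str: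
--     n = len(s)
--     if sum(1 for i in range(n // 2) if s[i] != s[n - i - 1]) > 2:
--         return "无法在题目限制下行成回文字符串"
--     return "".join(min(s[i], s[n - i - 1]) for i in range(n))
-- ===== Notes on version B (the rewrite author's own statement) =====
-- stated objective: simpler
-- what changed: Replaces A's single mutating pass with early-return and a changed-counter by a pure count of first-half mismatches followed by a comprehension that takes min(s[i], s[n-i-1]) at every position.
import Mathlib
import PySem

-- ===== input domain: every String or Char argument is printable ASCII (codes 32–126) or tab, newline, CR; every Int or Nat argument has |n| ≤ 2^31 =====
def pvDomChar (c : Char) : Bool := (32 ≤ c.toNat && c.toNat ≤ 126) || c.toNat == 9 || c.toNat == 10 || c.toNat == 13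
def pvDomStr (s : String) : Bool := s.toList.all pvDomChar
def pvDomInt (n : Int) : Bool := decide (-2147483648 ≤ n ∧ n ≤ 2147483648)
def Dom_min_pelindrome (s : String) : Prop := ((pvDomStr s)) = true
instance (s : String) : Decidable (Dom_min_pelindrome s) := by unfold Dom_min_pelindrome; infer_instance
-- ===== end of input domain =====

-- B replaces A's mutating loop with a mismatch count plus a min-comprehension; objective: simpler (same O(n) cost).


-- ===== PORT A =====
-- A's loop over range(n//2), mutating the char list in place (the if/else assignment is
-- inlined into the recursive call), with early return of the error literal on a third mismatch.
def minPelAuxA (l : List Char) (n i changed : Nat) : String :=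
  if _h : i < n / 2 then
    if l.getD i ' ' ≠ l.getD (n - i - 1) ' ' then
      if changed < 2 then
        minPelAuxA
          (if l.getD i ' ' < l.getD (n - i - 1) ' '
           then l.set (n - i - 1) (l.getD i ' ')
           else l.set i (l.getD (n - i - 1) ' '))
          n (i + 1) (changed + 1)
      else "无法在题目限制下行成回文字符串"
    else minPelAuxA l n (i + 1) changed
  else String.ofList l
termination_by n / 2 - i

def min_pelindrome (s : String) : String :=
  minPelAuxA s.toList s.toList.length 0 0

-- ===== PORT B =====
def min_pelindrome_alt (s : String) : String :=
  if ((List.range (s.toList.length / 2)).filter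
        (fun i => s.toList.getD i ' ' ≠ s.toList.getD (s.toList.length - i - 1) ' ')).length > 2 then
    "无法在题目限制下行成回文字符串"
  else
    String.ofList ((List.range s.toList.length).map
      (fun i => min (s.toList.getD i ' ') (s.toList.getD (s.toList.length - i - 1) ' ')))

-- ===== PRECONDITION & SPEC =====
def Spec_min_pelindrome (s : String) (out : String) : Prop := out = min_pelindrome_alt s
instance (s : String) (out : String) : Decidable (Spec_min_pelindrome s out) := by unfold Spec_min_pelindrome; infer_instance

-- ===== CLAIM (what is proved, stated in full; the proofs are below) =====
def Claim_equal_min_pelindrome : Prop := ∀ (s : String), Dom_min_pelindrome s → Spec_min_pelindrome s (min_pelindrome s)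

-- ===== LEMMAS AND PROOFS =====

theorem getD_lt (l : List Char) (j : Nat) (h : j < l.length) : l.getD j ' ' = l[j] :=
  List.getD_eq_getElem l ' ' h

-- the list A's loop has built after processing indices < i (pairs j / n-j-1 already minimised)
def stateOf (l : List Char) (i : Nat) : List Char :=
  (List.range l.length).map fun j =>
    if min j (l.length - j - 1) < i then min (l.getD j ' ') (l.getD (l.length - j - 1) ' ')
    else l.getD j ' '

-- number of mismatched pairs among indices < i
def misCount (l : List Char) (i : Nat) : Nat :=
  ((List.range i).filter (fun j => l.getD j ' ' ≠ l.getD (l.length - j - 1) ' ')).length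

theorem stateOf_length (l : List Char) (i : Nat) : (stateOf l i).length = l.length := by
  simp [stateOf]

theorem stateOf_get (l : List Char) (i j : Nat) (hj : j < l.length) :
    (stateOf l i)[j]'(by rw [stateOf_length]; exact hj) =
      if min j (l.length - j - 1) < i then min (l.getD j ' ') (l.getD (l.length - j - 1) ' ')
      else l.getD j ' ' := by
  simp [stateOf]

theorem stateOf_zero (l : List Char) : stateOf l 0 = l := by
  apply List.ext_getElem (by simp [stateOf_length])
  intro j h1 h2
  rw [stateOf_get l 0 j h2, if_neg (by omega), getD_lt l j h2]

theorem misCount_zero (l : List Char) : misCount l 0 = 0 := by simp [misCount]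

theorem misCount_succ (l : List Char) (i : Nat) :
    misCount l (i + 1) =
      misCount l i + (if l.getD i ' ' ≠ l.getD (l.length - i - 1) ' ' then 1 else 0) := by
  simp [misCount, List.range_succ, List.filter_append]
  split_ifs with h <;> simp [h]

theorem misCount_mono (l : List Char) {i j : Nat} (h : i ≤ j) : misCount l i ≤ misCount l j := by
  unfold misCount
  exact List.Sublist.length_le (List.Sublist.filter _ (List.range_sublist.mpr h))

theorem stateOf_getD_self (l : List Char) (i : Nat) (hi : i < l.length / 2) :
    (stateOf l i).getD i ' ' = l.getD i ' ' := by
  have h1 : i < l.length := lt_of_lt_of_le hi (Nat.div_le_self _ _)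
  rw [getD_lt _ _ (by rw [stateOf_length]; exact h1), stateOf_get l i i h1, if_neg (by omega)]

theorem stateOf_getD_mirror (l : List Char) (i : Nat) (hi : i < l.length / 2) :
    (stateOf l i).getD (l.length - i - 1) ' ' = l.getD (l.length - i - 1) ' ' := by
  have h0 : i < l.length := lt_of_lt_of_le hi (Nat.div_le_self _ _)
  have h1 : l.length - i - 1 < l.length := by omega
  rw [getD_lt _ _ (by rw [stateOf_length]; exact h1), stateOf_get l i _ h1, if_neg (by omega)]

-- stepping the invariant list: equal pair, nothing changes
theorem stateOf_step_eq (l : List Char) (i : Nat) (hi : i < l.length / 2)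
    (h : l.getD i ' ' = l.getD (l.length - i - 1) ' ') :
    stateOf l i = stateOf l (i + 1) := by
  have hiL : i < l.length := lt_of_lt_of_le hi (Nat.div_le_self _ _)
  apply List.ext_getElem (by simp [stateOf_length])
  intro j hj hj'
  have hjL : j < l.length := by simpa [stateOf_length] using hj
  rw [stateOf_get l i j hjL, stateOf_get l (i + 1) j hjL]
  by_cases hc : min j (l.length - j - 1) < i
  · rw [if_pos hc, if_pos (by omega)]
  · rw [if_neg hc]
    by_cases hc' : min j (l.length - j - 1) < i + 1
    · rw [if_pos hc']
      have hcase : j = i ∨ j = l.length - i - 1 := by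
        rcases Nat.le_total j (l.length - j - 1) with hle | hle
        · left; omega
        · right; omega
      rcases hcase with hEq | hEq
      · subst hEq; rw [← h, min_self]
      · subst hEq
        have hmir : l.length - (l.length - i - 1) - 1 = i := by omega
        rw [hmir, h, min_self]
    · rw [if_neg hc']

-- stepping the invariant list: mismatched pair, A sets one side to the smaller char
theorem stateOf_step_ne (l : List Char) (i : Nat) (hi : i < l.length / 2)
    (h : l.getD i ' ' ≠ l.getD (l.length - i - 1) ' ') :
    (if l.getD i ' ' < l.getD (l.length - i - 1) ' '
     then (stateOf l i).set (l.length - i - 1) (l.getD i ' ')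
     else (stateOf l i).set i (l.getD (l.length - i - 1) ' ')) = stateOf l (i + 1) := by
  have hiL : i < l.length := lt_of_lt_of_le hi (Nat.div_le_self _ _)
  have hmL : l.length - i - 1 < l.length := by omega
  have hne : i ≠ l.length - i - 1 := by omega
  have hmir : l.length - (l.length - i - 1) - 1 = i := by omega
  apply List.ext_getElem (by split_ifs <;> simp [stateOf_length])
  intro j hj hj'
  have hjL : j < l.length := by simpa [stateOf_length] using hj'
  split_ifs with hlt
  · -- s[i] < s[n-i-1]: position n-i-1 is set to s[i]
    rw [List.getElem_set, stateOf_get l (i + 1) j hjL]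
    by_cases hji : j = i
    · subst hji
      rw [if_neg (by omega), stateOf_get l j j hjL, if_neg (by omega), if_pos (by omega)]
      exact (min_eq_left (le_of_lt hlt)).symm
    · by_cases hjm : j = l.length - i - 1
      · subst hjm
        rw [if_pos rfl, hmir, if_pos (by omega)]
        exact (min_eq_right (le_of_lt hlt)).symm
      · rw [if_neg (by omega), stateOf_get l i j hjL]
        by_cases hc : min j (l.length - j - 1) < i
        · rw [if_pos hc, if_pos (by omega)]
        · rw [if_neg hc, if_neg (by omega)]
  · -- otherwise position i is set to s[n-i-1]
    have hba : l.getD (l.length - i - 1) ' ' < l.getD i ' ' :=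
      lt_of_le_of_ne (not_lt.mp hlt) (Ne.symm h)
    rw [List.getElem_set, stateOf_get l (i + 1) j hjL]
    by_cases hji : j = i
    · subst hji
      rw [if_pos rfl, if_pos (by omega)]
      exact (min_eq_right (le_of_lt hba)).symm
    · by_cases hjm : j = l.length - i - 1
      · subst hjm
        rw [if_neg (by omega), stateOf_get l i _ hjL, if_neg (by omega), hmir, if_pos (by omega)]
        exact (min_eq_left (le_of_lt hba)).symm
      · rw [if_neg (by omega), stateOf_get l i j hjL]
        by_cases hc : min j (l.length - j - 1) < i
        · rw [if_pos hc, if_pos (by omega)]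
        · rw [if_neg hc, if_neg (by omega)]

-- B's built list is exactly the fully-processed state of A's loop
theorem buildB_eq_stateOf (l : List Char) :
    (List.range l.length).map (fun i => min (l.getD i ' ') (l.getD (l.length - i - 1) ' '))
      = stateOf l (l.length / 2) := by
  apply List.ext_getElem (by simp [stateOf_length])
  intro j hj hj'
  have hjL : j < l.length := by simpa using hj
  simp only [List.getElem_map, List.getElem_range]
  rw [stateOf_get l (l.length / 2) j hjL]
  by_cases hc : min j (l.length - j - 1) < l.length / 2
  · rw [if_pos hc]
  · rw [if_neg hc]
    have hEq : j = l.length - j - 1 := by omega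
    rw [← hEq, min_self]

-- misCount is B's filter count by definition
theorem misCount_eq_filter (l : List Char) :
    misCount l (l.length / 2) =
      ((List.range (l.length / 2)).filter
        (fun i => l.getD i ' ' ≠ l.getD (l.length - i - 1) ' ')).length := rfl

-- main invariant: running A's loop from the state after i steps gives B's answer
theorem aux_main (l : List Char) :
    ∀ (k i : Nat), l.length / 2 - i ≤ k → i ≤ l.length / 2 → misCount l i ≤ 2 →
      minPelAuxA (stateOf l i) l.length i (misCount l i) =
        (if 2 < misCount l (l.length / 2) then "无法在题目限制下行成回文字符串"
         else String.ofList (stateOf l (l.length / 2))) := by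
  intro k
  induction k with
  | zero =>
    intro i hk hi hc
    have hEq : i = l.length / 2 := by omega
    subst hEq
    rw [minPelAuxA, dif_neg (by omega), if_neg (by omega)]
  | succ k ih =>
    intro i hk hi hc
    by_cases hlt : i < l.length / 2
    · rw [minPelAuxA, dif_pos hlt,
        stateOf_getD_self l i hlt, stateOf_getD_mirror l i hlt]
      by_cases hmis : l.getD i ' ' ≠ l.getD (l.length - i - 1) ' '
      · rw [if_pos hmis]
        by_cases hch : misCount l i < 2
        · rw [if_pos hch, stateOf_step_ne l i hlt hmis]
          have hcnt : misCount l i + 1 = misCount l (i + 1) := by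
            rw [misCount_succ, if_pos hmis]
          rw [hcnt]
          exact ih (i + 1) (by omega) (by omega) (by omega)
        · rw [if_neg hch]
          have h3 : 2 < misCount l (l.length / 2) := by
            have hs : misCount l (i + 1) = misCount l i + 1 := by
              rw [misCount_succ, if_pos hmis]
            have hm := misCount_mono l (show i + 1 ≤ l.length / 2 by omega)
            omega
          rw [if_pos h3]
      · rw [if_neg hmis, stateOf_step_eq l i hlt (not_not.mp hmis)]
        have hcnt : misCount l i = misCount l (i + 1) := by
          rw [misCount_succ, if_neg hmis]; omega
        rw [hcnt]
        exact ih (i + 1) (by omega) (by omega) (by omega)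
    · have hEq : i = l.length / 2 := by omega
      subst hEq
      rw [minPelAuxA, dif_neg (by omega), if_neg (by omega)]

-- ===== VERDICT (by name: the statement is the Claim_ definition above) =====
theorem min_pelindrome_spec : Claim_equal_min_pelindrome := by
  intro s _
  unfold Spec_min_pelindrome min_pelindrome min_pelindrome_alt
  have hmain := aux_main s.toList (s.toList.length / 2) 0 (by omega) (Nat.zero_le _)
    (by rw [misCount_zero]; omega)
  rw [stateOf_zero, misCount_zero] at hmain
  rw [hmain, buildB_eq_stateOf, ← misCount_eq_filter]
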